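-- pv_equiv track=rewrite | github.com/ellismckenzielee/codewars-python | what_will_be_the_odd_one_out.py | odd_one_out
-- ===== SOURCE A (Python) =====
-- def odd_one_out(s):
--     characters = {}
--     checked = set()
--     output_list = []
--     for i, char in enumerate(s):
--         if char not in checked:
--             characters[char] = [s.count(char) % 2 == 1, len(s) - 1 - s[::-1].index(char)]
--             checked.add(char)
--         if characters[char][0] == True and characters[char][1] == i:
--             output_list.append(char)
--     return output_list
-- ===== SOURCE B (Python) =====
-- def odd_one_out(s):
--     counts = {}
--     for ch in s:
--         counts[ch] = counts.get(ch, 0) + 1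
--     seen = set()
--     rev_result = []
--     for ch in reversed(s):
--         if ch not in seen:
--             seen.add(ch)
--             if counts[ch] % 2 == 1:
--                 rev_result.append(ch)
--     rev_result.reverse()
--     return rev_result
-- ===== Notes on version B (the rewrite author's own statement) =====
-- stated objective: alternative
-- what changed: Instead of per-character dict bookkeeping with repeated s.count and s[::-1].index scans, B builds one character-count table in a single pass and then collects odd-count characters in one reverse pass with a seen set (first reverse encounter = last occurrence), reversing the collected list at the end.
import Mathlib
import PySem

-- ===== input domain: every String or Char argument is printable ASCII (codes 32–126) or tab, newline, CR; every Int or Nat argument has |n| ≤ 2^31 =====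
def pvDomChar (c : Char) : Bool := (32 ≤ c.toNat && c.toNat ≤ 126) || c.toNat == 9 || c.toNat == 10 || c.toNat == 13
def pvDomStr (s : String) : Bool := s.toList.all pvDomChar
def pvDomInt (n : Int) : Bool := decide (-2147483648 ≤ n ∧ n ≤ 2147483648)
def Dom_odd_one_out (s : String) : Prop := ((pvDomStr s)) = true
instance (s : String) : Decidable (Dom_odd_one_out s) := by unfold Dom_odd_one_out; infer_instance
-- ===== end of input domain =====

-- B replaces A's per-character dict of (parity, last index) built with repeated full scans
-- by one counting pass plus one reverse pass with a seen set (objective: alternative algorithm).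

-- ===== PORT A =====
-- helper: Python's 'len(s) - 1 - s[::-1].index(char)' (index? is always 'some' for a char of s;
-- the getD default is unreachable)
def lastIdxI (l : List Char) (c : Char) : Int :=
  (l.length : Int) - 1 - ((PySem.List.index? l.reverse c).getD 0 : Int)

-- loop body of A: dict 'characters' (pairs for the two-element lists), set 'checked', output list
def pvStepA (l : List Char)
    (st : PySem.Dict Char (Bool × Int) × PySem.Set Char × List String) (ic : Int × Char) :
    PySem.Dict Char (Bool × Int) × PySem.Set Char × List String :=
  let (characters, checked, output) :=
    if PySem.Set.contains st.2.1 ic.2 then st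
    else (st.1.insert ic.2 (PySem.List.count l ic.2 % 2 == 1, lastIdxI l ic.2),
          PySem.Set.add st.2.1 ic.2, st.2.2)
  -- characters[char]: always present (inserted above or in an earlier iteration); default unreachable
  let v := characters.getD ic.2 (false, 0)
  if v.1 == true && v.2 == ic.1 then (characters, checked, output ++ [String.ofList [ic.2]])
  else (characters, checked, output)

def odd_one_out (s : String) : List String :=
  let l := s.toList
  ((PySem.List.enumerate l 0).foldl (pvStepA l)
    (PySem.Dict.empty, PySem.Set.empty, ([] : List String))).2.2

-- ===== PORT B =====
-- loop body of B's reverse pass: seen set and collected list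
def pvStepB (counts : PySem.Dict Char Int) (st : PySem.Set Char × List String) (ch : Char) :
    PySem.Set Char × List String :=
  if PySem.Set.contains st.1 ch then st
  else (PySem.Set.add st.1 ch,
        if PySem.Int.mod (counts.getD ch 0) 2 == 1 then st.2 ++ [String.ofList [ch]] else st.2)

def odd_one_out_alt (s : String) : List String :=
  let l := s.toList
  let counts := l.foldl (fun d ch => d.insert ch (d.getD ch 0 + 1)) PySem.Dict.empty
  ((l.reverse.foldl (pvStepB counts) (PySem.Set.empty, ([] : List String))).2).reverse

-- ===== PRECONDITION & SPEC =====
def Spec_odd_one_out (s : String) (out : List String) : Prop := out = odd_one_out_alt s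
instance (s : String) (out : List String) : Decidable (Spec_odd_one_out s out) := by unfold Spec_odd_one_out; infer_instance

-- ===== CLAIM (what is proved, stated in full; the proofs are below) =====
def Claim_equal_odd_one_out : Prop := ∀ (s : String), Dom_odd_one_out s → Spec_odd_one_out s (odd_one_out s)

-- ===== LEMMAS AND PROOFS =====

-- dedup keeping LAST occurrences, in order of last occurrence
def dl : List Char → List Char
  | [] => []
  | c :: t => if c ∈ t then dl t else c :: dl t

-- dedup keeping FIRST occurrences relative to an already-seen list
def dfirst (seen : List Char) : List Char → List Char
  | [] => []
  | c :: t => if c ∈ seen then dfirst seen t else c :: dfirst (seen ++ [c]) t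

-- the common canonical value: odd-count chars in order of last occurrence
def canon (l : List Char) : List String :=
  ((dl l).filter (fun c => PySem.List.count l c % 2 == 1)).map (fun c => String.ofList [c])

lemma contains_iff (s : PySem.Set Char) (x : Char) :
    PySem.Set.contains s x = true ↔ x ∈ s := by
  simp [PySem.Set.contains]

lemma dfirst_append (c : Char) :
    ∀ (xs seen : List Char),
      dfirst seen (xs ++ [c]) = dfirst seen xs ++ (if c ∈ seen ∨ c ∈ xs then [] else [c]) := by
  intro xs
  induction xs with
  | nil => intro seen; by_cases h : c ∈ seen <;> simp [dfirst, h]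
  | cons x t ih =>
    intro seen
    by_cases hx : x ∈ seen
    · have hcond : (c ∈ seen ∨ c ∈ t) ↔ (c ∈ seen ∨ c ∈ x :: t) := by
        constructor
        · rintro (h | h) <;> simp [h]
        · rintro (h | h)
          · exact Or.inl h
          · rcases List.mem_cons.mp h with h | h
            · exact Or.inl (h ▸ hx)
            · exact Or.inr h
      simp only [List.cons_append, dfirst, if_pos hx, ih seen]
      by_cases hc : c ∈ seen ∨ c ∈ t
      · rw [if_pos hc, if_pos (hcond.mp hc)]
      · rw [if_neg hc, if_neg (fun h => hc (hcond.mpr h))]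
    · have hcond : (c ∈ seen ++ [x] ∨ c ∈ t) ↔ (c ∈ seen ∨ c ∈ x :: t) := by
        simp [List.mem_append]; tauto
      simp only [List.cons_append, dfirst, if_neg hx, ih (seen ++ [x])]
      by_cases hc : c ∈ seen ++ [x] ∨ c ∈ t
      · rw [if_pos hc, if_pos (hcond.mp hc)]
      · rw [if_neg hc, if_neg (fun h => hc (hcond.mpr h))]

lemma dfirst_reverse (l : List Char) : dfirst [] l.reverse = (dl l).reverse := by
  induction l with
  | nil => simp [dfirst, dl]
  | cons c t ih =>
    have : (c :: t).reverse = t.reverse ++ [c] := by simp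
    rw [this, dfirst_append, ih]
    by_cases h : c ∈ t <;> simp [dl, h]

lemma foldB (cnt : PySem.Dict Char Int) :
    ∀ (r : List Char) (seen : PySem.Set Char) (acc : List String),
      (r.foldl (pvStepB cnt) (seen, acc)).2
        = acc ++ ((dfirst seen r).filter
            (fun c => PySem.Int.mod (cnt.getD c 0) 2 == 1)).map (fun c => String.ofList [c]) := by
  intro r
  induction r with
  | nil => intro seen acc; simp [dfirst]
  | cons c t ih =>
    intro seen acc
    by_cases h : c ∈ seen
    · have hb : PySem.Set.contains seen c = true := (contains_iff _ _).mpr h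
      simp only [List.foldl_cons, pvStepB, if_pos hb, dfirst, if_pos h, ih]
    · have hb : ¬ (PySem.Set.contains seen c = true) := fun hh => h ((contains_iff _ _).mp hh)
      have hadd : PySem.Set.add seen c = seen ++ [c] := by
        simp only [PySem.Set.add]; rw [if_neg hb]
      simp only [List.foldl_cons, pvStepB, if_neg hb, hadd, dfirst, if_neg h, ih,
        List.filter_cons]
      split_ifs <;> simp_all

lemma counts_getD (l : List Char) (c : Char) :
    (l.foldl (fun d ch => d.insert ch (d.getD ch 0 + 1)) PySem.Dict.empty).getD c 0
      = (List.count c l : Int) := by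
  rw [PySem.Dict.getD_foldl_insert_add_one, PySem.Dict.getD_empty]; ring

lemma mod_cast_pred (n : Nat) :
    (PySem.Int.mod (n : Int) 2 == 1) = (n % 2 == 1) := by
  have h : PySem.Int.mod (n : Int) 2 = ((n % 2 : Nat) : Int) := by
    exact_mod_cast PySem.Int.mod_natCast n 2
  rw [h]
  by_cases h1 : n % 2 = 1 <;> simp [h1]
  omega

lemma alt_eq_canon (s : String) : odd_one_out_alt s = canon s.toList := by
  have hdef : odd_one_out_alt s
      = ((s.toList.reverse.foldl
          (pvStepB (s.toList.foldl (fun d ch => d.insert ch (d.getD ch 0 + 1)) PySem.Dict.empty))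
          (PySem.Set.empty, ([] : List String))).2).reverse := rfl
  have hempty : (PySem.Set.empty : PySem.Set Char) = ([] : List Char) := rfl
  have hpred : (fun c => (PySem.Int.mod
        ((s.toList.foldl (fun d ch => d.insert ch (d.getD ch 0 + 1)) PySem.Dict.empty).getD c 0)
        2 == 1))
      = (fun c => PySem.List.count s.toList c % 2 == 1) := by
    funext c
    rw [counts_getD, mod_cast_pred, PySem.List.count_eq]
  rw [hdef]
  unfold canon
  rw [foldB, hempty, dfirst_reverse, List.nil_append, hpred,
    List.filter_reverse, List.map_reverse, List.reverse_reverse]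

-- position of the check in A: at the index where char c sits with suffix t' after it,
-- 'characters[char][1] == i' holds iff c has no later occurrence
lemma lastIdxI_eq_iff (p t' : List Char) (c : Char) :
    (lastIdxI (p ++ c :: t') c = (p.length : Int)) ↔ c ∉ t' := by
  have hrev : (p ++ c :: t').reverse = t'.reverse ++ c :: p.reverse := by simp
  by_cases hc : c ∈ t'
  · obtain ⟨k, hk⟩ : ∃ k, PySem.List.index? (t'.reverse) c = some k := by
      have := (PySem.List.index?_isSome_iff (t'.reverse) c).mpr (List.mem_reverse.mpr hc)
      exact Option.isSome_iff_exists.mp this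
    obtain ⟨hklt, -, -⟩ := PySem.List.getElem_of_index?_eq_some hk
    have hidx : PySem.List.index? (p ++ c :: t').reverse c = some k := by
      rw [hrev, PySem.List.index?_append_of_mem _ (List.mem_reverse.mpr hc)]; exact hk
    simp only [lastIdxI, hidx, Option.getD_some]
    constructor
    · intro h; exfalso
      have hlen : (p ++ c :: t').length = p.length + 1 + t'.length := by simp; omega
      rw [hlen] at h
      have : k < t'.length := by simpa using hklt
      push_cast at h; omega
    · intro h; exact absurd hc h
  · have hidx : PySem.List.index? (p ++ c :: t').reverse c = some t'.length := by
      rw [hrev]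
      exact (PySem.List.index?_eq_some_iff _ _ _).mpr
        ⟨t'.reverse, p.reverse, rfl, by simp, by simpa using hc⟩
    simp only [lastIdxI, hidx, Option.getD_some]
    have hlen : (p ++ c :: t').length = p.length + 1 + t'.length := by simp; omega
    rw [hlen]
    constructor
    · intro _; exact hc
    · intro _; push_cast; omega

lemma foldA (l : List Char) :
    ∀ (t p : List Char), l = p ++ t →
    ∀ (d : PySem.Dict Char (Bool × Int)) (ck : PySem.Set Char) (out : List String),
      (∀ x, x ∈ ck ↔ x ∈ p) →
      (∀ x, x ∈ p → d.getD x (false, (0 : Int))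
          = (PySem.List.count l x % 2 == 1, lastIdxI l x)) →
      ((PySem.List.enumerate t (p.length : Int)).foldl (pvStepA l) (d, ck, out)).2.2
        = out ++ ((dl t).filter (fun c => PySem.List.count l c % 2 == 1)).map
            (fun c => String.ofList [c]) := by
  intro t
  induction t with
  | nil => intro p _ d ck out _ _; simp [PySem.List.enumerate, dl]
  | cons c t' ih =>
    intro p hl d ck out hck hd
    rw [PySem.List.enumerate_cons, List.foldl_cons]
    have hstart : ((p.length : Int) + 1) = (((p ++ [c]).length : Int)) := by simp
    have hl' : l = (p ++ [c]) ++ t' := by simpa using hl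
    have hmatch : (lastIdxI l c == (p.length : Int)) = decide (c ∉ t') := by
      by_cases hct : c ∈ t'
      · have hne : lastIdxI l c ≠ (p.length : Int) := by
          rw [hl]; exact fun h => ((lastIdxI_eq_iff p t' c).mp h) hct
        simp [hct, beq_eq_false_iff_ne.mpr hne]
      · have heq : lastIdxI l c = (p.length : Int) := by
          rw [hl]; exact (lastIdxI_eq_iff p t' c).mpr hct
        simp [hct, heq]
    have hfinish : ∀ ck' d',
        (∀ x, x ∈ ck' ↔ x ∈ p ++ [c]) →
        (∀ x, x ∈ p ++ [c] → d'.getD x (false, (0 : Int))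
            = (PySem.List.count l x % 2 == 1, lastIdxI l x)) →
        ((PySem.List.enumerate t' ((p.length : Int) + 1)).foldl (pvStepA l)
            (d', ck', out ++ (if (PySem.List.count l c % 2 == 1) && decide (c ∉ t')
                              then [String.ofList [c]] else []))).2.2
          = out ++ ((dl (c :: t')).filter (fun x => PySem.List.count l x % 2 == 1)).map
              (fun x => String.ofList [x]) := by
      intro ck' d' hck' hd'
      rw [hstart, ih (p ++ [c]) hl' d' ck' _ hck' hd']
      by_cases hct : c ∈ t'
      · simp [dl, hct]
      · simp [dl, hct, List.filter_cons]
        all_goals split_ifs <;> simp_all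
    by_cases hb : c ∈ ck
    · have hcp : c ∈ p := (hck c).mp hb
      have hcontains : PySem.Set.contains ck c = true := (contains_iff _ _).mpr hb
      have hv : d.getD c (false, (0 : Int))
          = (PySem.List.count l c % 2 == 1, lastIdxI l c) := hd c hcp
      have hstep : pvStepA l (d, ck, out) ((p.length : Int), c)
          = (d, ck, out ++ (if (PySem.List.count l c % 2 == 1) && decide (c ∉ t')
                            then [String.ofList [c]] else [])) := by
        simp only [pvStepA, if_pos hcontains, hv, hmatch]
        split_ifs <;> simp_all
      rw [hstep]
      exact hfinish ck d
        (fun x => by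
          rw [hck x]
          simp only [List.mem_append, List.mem_singleton]
          constructor
          · exact Or.inl
          · rintro (h | h)
            · exact h
            · exact h ▸ hcp)
        (fun x hx => by
          rcases List.mem_append.mp hx with h | h
          · exact hd x h
          · exact (List.mem_singleton.mp h) ▸ hd c hcp)
    · have hcontains : ¬ (PySem.Set.contains ck c = true) :=
        fun hh => hb ((contains_iff _ _).mp hh)
      have hcp : c ∉ p := fun h => hb ((hck c).mpr h)
      have hadd : PySem.Set.add ck c = ck ++ [c] := by
        simp only [PySem.Set.add]; rw [if_neg hcontains]
      have hget : (d.insert c (PySem.List.count l c % 2 == 1, lastIdxI l c)).getD c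
            (false, (0 : Int)) = (PySem.List.count l c % 2 == 1, lastIdxI l c) := by
        rw [PySem.Dict.getD_insert]; simp
      have hstep : pvStepA l (d, ck, out) ((p.length : Int), c)
          = (d.insert c (PySem.List.count l c % 2 == 1, lastIdxI l c), ck ++ [c],
             out ++ (if (PySem.List.count l c % 2 == 1) && decide (c ∉ t')
                     then [String.ofList [c]] else [])) := by
        clear hfinish ih hck hd hl hl' hstart
        simp only [pvStepA, if_neg hcontains, hadd, hget, hmatch]
        split_ifs <;> simp_all
      rw [hstep]
      exact hfinish (ck ++ [c]) (d.insert c (PySem.List.count l c % 2 == 1, lastIdxI l c))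
        (fun x => by simp [List.mem_append, hck x])
        (fun x hx => by
          rw [PySem.Dict.getD_insert]
          rcases List.mem_append.mp hx with h | h
          · rw [if_neg (fun hxc : x = c => hcp (hxc ▸ h))]
            exact hd x h
          · rw [if_pos (List.mem_singleton.mp h), List.mem_singleton.mp h])

lemma a_eq_canon (s : String) : odd_one_out s = canon s.toList := by
  have hdef : odd_one_out s
      = ((PySem.List.enumerate s.toList 0).foldl (pvStepA s.toList)
          (PySem.Dict.empty, PySem.Set.empty, ([] : List String))).2.2 := rfl
  have h := foldA s.toList s.toList [] (by simp) PySem.Dict.empty PySem.Set.empty []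
    (fun x => Iff.rfl) (fun x hx => by simp at hx)
  rw [hdef]
  unfold canon
  simpa using h

-- ===== VERDICT (by name: the statement is the Claim_ definition above) =====
theorem odd_one_out_spec : Claim_equal_odd_one_out := by
  intro s _
  show odd_one_out s = odd_one_out_alt s
  rw [a_eq_canon, alt_eq_canon]
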